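-- pv_equiv track=rewrite | github.com/manas-17045/LeetcodeSolutions | Leetcode 3801-3900/3876/3876.py | uniformArray
-- ===== SOURCE A (Python) =====
-- def uniformArray(nums1: list[int]) -> bool:
--     """
--     Determines if a uniform parity array can be constructed based on the minimum values.
--
--     :param nums1: A list of integers to evaluate.
--     :return: True if the minimum odd number is less than the minimum even number or if one parity is missing, False otherwise.
--     """
--     minOdd = float('inf')
--     minEven = float('inf')
--
--     for num in nums1:
--         if num % 2 != 0:
--             if num < minOdd:
--                 minOdd = num
--         else:
--             if num < minEven:
--                 minEven = num
--
--     return minOdd == float('inf') or minEven == float('inf') or minOdd < minEven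
-- ===== SOURCE B (Python) =====
-- def uniformArray(nums1: list[int]) -> bool:
--     if not nums1:
--         return True
--     m = min(nums1)
--     has_odd = any(n % 2 != 0 for n in nums1)
--     has_even = any(n % 2 == 0 for n in nums1)
--     return not has_odd or not has_even or m % 2 != 0
-- ===== Notes on version B (the rewrite author's own statement) =====
-- stated objective: simpler
-- what changed: Instead of maintaining two parity-specific minima in one hand-written loop, B computes the single global minimum with min() plus two any() parity-presence flags, using the fact that when both parities are present the answer is exactly 'the global minimum is odd'.
import Mathlib
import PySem

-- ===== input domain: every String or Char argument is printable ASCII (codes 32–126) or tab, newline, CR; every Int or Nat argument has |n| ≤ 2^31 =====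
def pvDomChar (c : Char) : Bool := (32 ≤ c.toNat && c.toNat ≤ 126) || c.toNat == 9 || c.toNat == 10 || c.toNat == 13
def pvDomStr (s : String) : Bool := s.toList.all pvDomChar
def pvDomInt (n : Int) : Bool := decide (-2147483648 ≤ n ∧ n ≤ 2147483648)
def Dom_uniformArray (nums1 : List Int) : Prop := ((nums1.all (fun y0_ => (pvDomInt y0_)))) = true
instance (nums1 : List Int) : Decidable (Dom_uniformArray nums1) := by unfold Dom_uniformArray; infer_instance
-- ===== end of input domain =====

-- B replaces A's single loop maintaining two parity-specific minima by min() plus two any()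
-- parity-presence checks (when both parities occur, the answer is just "the global min is odd").

-- ===== PORT A =====
-- num % 2 != 0  (Python % on positive divisor)
def pvOddb (n : Int) : Bool := PySem.Int.mod n 2 != 0

-- 'num < cur' where cur may still be float('inf') (none)
def pvLtInf (num : Int) (cur : Option Int) : Bool :=
  match cur with
  | none => true
  | some m => num < m

-- one iteration of A's for-loop over the state (minOdd, minEven), none = float('inf')
def pvStepA (s : Option Int × Option Int) (num : Int) : Option Int × Option Int :=
  if pvOddb num then
    (if pvLtInf num s.1 then (some num, s.2) else s)
  else
    (if pvLtInf num s.2 then (s.1, some num) else s)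

def uniformArray (nums1 : List Int) : Bool :=
  let s := nums1.foldl pvStepA (none, none)
  match s.1, s.2 with
  | none, _ => true
  | _, none => true
  | some a, some b => a < b

-- ===== PORT B =====
def uniformArray_alt (nums1 : List Int) : Bool :=
  match nums1 with
  | [] => true
  | _ :: _ =>
    match PySem.List.min? nums1 (fun y => y) with
    | none => true   -- unreachable: nums1 is nonempty
    | some m =>
      (!nums1.any pvOddb) || (!nums1.any (fun n => PySem.Int.mod n 2 == 0)) ||
        (PySem.Int.mod m 2 != 0)

-- ===== PRECONDITION & SPEC =====
def Spec_uniformArray (nums1 : List Int) (out : Bool) : Prop := out = uniformArray_alt nums1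
instance (nums1 : List Int) (out : Bool) : Decidable (Spec_uniformArray nums1 out) := by unfold Spec_uniformArray; infer_instance

-- ===== CLAIM (what is proved, stated in full; the proofs are below) =====
def Claim_equal_uniformArray : Prop := ∀ (nums1 : List Int), Dom_uniformArray nums1 → Spec_uniformArray nums1 (uniformArray nums1)

-- ===== LEMMAS AND PROOFS =====

-- running minimum as an Option (none = float('inf'))
def pvOMin (o : Option Int) (n : Int) : Option Int :=
  some (match o with | none => n | some m => min m n)

theorem pvStepA_eq (s : Option Int × Option Int) (num : Int) :
    pvStepA s num =
      if pvOddb num then (pvOMin s.1 num, s.2) else (s.1, pvOMin s.2 num) := by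
  obtain ⟨o, e⟩ := s
  unfold pvStepA pvOMin pvLtInf
  by_cases h : pvOddb num = true
  · simp only [h, if_true]
    cases o with
    | none => simp
    | some m =>
      by_cases hlt : num < m
      · simp [hlt, min_eq_right (le_of_lt hlt)]
      · simp [hlt, min_eq_left (by omega : m ≤ num)]
  · simp only [Bool.not_eq_true] at h
    simp only [h, Bool.false_eq_true, if_false]
    cases e with
    | none => simp
    | some m =>
      by_cases hlt : num < m
      · simp [hlt, min_eq_right (le_of_lt hlt)]
      · simp [hlt, min_eq_left (by omega : m ≤ num)]

theorem pvFoldA_eq (l : List Int) : ∀ (o e : Option Int),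
    l.foldl pvStepA (o, e) =
      ((l.filter pvOddb).foldl pvOMin o, (l.filter (fun n => !pvOddb n)).foldl pvOMin e) := by
  induction l with
  | nil => intro o e; simp
  | cons x t ih =>
    intro o e
    simp only [List.foldl_cons, pvStepA_eq, List.filter_cons]
    by_cases h : pvOddb x = true
    · simp [h, ih]
    · simp only [Bool.not_eq_true] at h
      simp [h, ih]

theorem pvOMin_some (l : List Int) : ∀ (a : Int),
    l.foldl pvOMin (some a) = some (l.foldl min a) := by
  induction l with
  | nil => intro a; rfl
  | cons x t ih => intro a; simp [pvOMin, ih]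

theorem pvOMin_none (l : List Int) :
    l.foldl pvOMin none =
      (match l with | [] => none | x :: t => some (t.foldl min x)) := by
  cases l with
  | nil => rfl
  | cons x t => simp [pvOMin, pvOMin_some]

theorem pvFMin_mem : ∀ (t : List Int) (x : Int), t.foldl min x ∈ x :: t := by
  intro t
  induction t with
  | nil => intro x; simp
  | cons y s ih =>
    intro x
    simp only [List.foldl_cons]
    have h := ih (min x y)
    rw [List.mem_cons] at h ⊢
    rcases h with h | h
    · rcases min_choice x y with h2 | h2
      · left; rw [h, h2]
      · right; rw [List.mem_cons]; left; rw [h, h2]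
    · right; rw [List.mem_cons]; right; exact h

theorem pvFMin_le_init : ∀ (t : List Int) (a : Int), t.foldl min a ≤ a := by
  intro t
  induction t with
  | nil => intro a; simp
  | cons y s ih =>
    intro a
    simp only [List.foldl_cons]
    exact le_trans (ih (min a y)) (min_le_left _ _)

theorem pvFMin_le : ∀ (t : List Int) (x y : Int), y ∈ x :: t → t.foldl min x ≤ y := by
  intro t
  induction t with
  | nil => intro x y h; simp_all
  | cons z s ih =>
    intro x y h
    simp only [List.foldl_cons]
    rw [List.mem_cons, List.mem_cons] at h
    rcases h with h | h | h
    · subst h; exact le_trans (pvFMin_le_init s (min y z)) (min_le_left _ _)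
    · subst h; exact le_trans (pvFMin_le_init s (min x y)) (min_le_right _ _)
    · exact ih (min x z) y (List.mem_cons.mpr (Or.inr h))

theorem pvModEq (n : Int) : PySem.Int.mod n 2 = n % 2 :=
  PySem.Int.mod_eq_emod_of_pos (by norm_num)

theorem pvAnyFalse (l : List Int) (p : Int → Bool) (h : l.filter p = []) :
    l.any p = false := by
  rw [List.any_eq_false]
  intro y hy
  intro hpy
  have : y ∈ l.filter p := List.mem_filter.mpr ⟨hy, hpy⟩
  rw [h] at this; simp at this

theorem pvMinFromFold (l : List Int) (v : Int)
    (h : l.foldl pvOMin none = some v) : v ∈ l ∧ ∀ y ∈ l, v ≤ y := by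
  rw [pvOMin_none] at h
  rcases hc : l with _ | ⟨y, s⟩
  · rw [hc] at h; simp at h
  · rw [hc] at h
    have he : s.foldl min y = v := Option.some.inj h
    constructor
    · rw [← he]; exact pvFMin_mem s y
    · intro z hz; rw [← he]; exact pvFMin_le s y z hz

theorem pvMain (nums1 : List Int) : uniformArray nums1 = uniformArray_alt nums1 := by
  cases nums1 with
  | nil => rfl
  | cons x t =>
    unfold uniformArray uniformArray_alt
    rw [pvFoldA_eq, PySem.List.min?_id_cons]
    rw [List.filter_congr (l := x :: t)
      (p := fun n => !pvOddb n) (q := fun n => PySem.Int.mod n 2 == 0)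
      (fun n _ => by simp [pvOddb, bne])]
    set m := t.foldl min x with hm
    rcases hodds : ((x :: t).filter pvOddb).foldl pvOMin none with _ | mo <;>
      rcases hevens : ((x :: t).filter (fun n => PySem.Int.mod n 2 == 0)).foldl pvOMin none with _ | me
    all_goals simp only [hodds, hevens]
    · -- no odds: A returns true; B: any pvOddb is false
      have h0 : (x :: t).filter pvOddb = [] := by
        rcases h : (x :: t).filter pvOddb with _ | ⟨y, s⟩
        · rfl
        · rw [h, pvOMin_none] at hodds; simp at hodds
      rw [pvAnyFalse _ _ h0]; simp
    · have h0 : (x :: t).filter pvOddb = [] := by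
        rcases h : (x :: t).filter pvOddb with _ | ⟨y, s⟩
        · rfl
        · rw [h, pvOMin_none] at hodds; simp at hodds
      rw [pvAnyFalse _ _ h0]; simp
    · have h0 : (x :: t).filter (fun n => PySem.Int.mod n 2 == 0) = [] := by
        rcases h : (x :: t).filter (fun n => PySem.Int.mod n 2 == 0) with _ | ⟨y, s⟩
        · rfl
        · rw [h, pvOMin_none] at hevens; simp at hevens
      rw [pvAnyFalse _ _ h0]; simp
    · -- both parities present
      obtain ⟨hmoMemF, _⟩ := pvMinFromFold _ _ hodds
      obtain ⟨hmeMemF, _⟩ := pvMinFromFold _ _ hevens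
      obtain ⟨hmoMem, hmoOdd⟩ := List.mem_filter.mp hmoMemF
      obtain ⟨hmeMem, hmeEven⟩ := List.mem_filter.mp hmeMemF
      have hmoOdd' : mo % 2 = 1 := by
        simp only [pvOddb, pvModEq, bne_iff_ne, ne_eq] at hmoOdd
        have := Int.emod_two_eq mo; omega
      have hmeEven' : me % 2 = 0 := by
        rw [beq_iff_eq, pvModEq] at hmeEven
        exact hmeEven
      have hanyO : (x :: t).any pvOddb = true :=
        List.any_eq_true.mpr ⟨mo, hmoMem, hmoOdd⟩
      have hanyE : ((x :: t).any fun n => PySem.Int.mod n 2 == 0) = true :=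
        List.any_eq_true.mpr ⟨me, hmeMem, hmeEven⟩
      have hmle_o : m ≤ mo := pvFMin_le t x mo hmoMem
      have hmle_e : m ≤ me := pvFMin_le t x me hmeMem
      rw [hanyO, hanyE]
      simp only [Bool.not_true, Bool.false_or]
      have hmmem : m ∈ x :: t := pvFMin_mem t x
      have hm2 := Int.emod_two_eq m
      rcases hm2 with hme2 | hmo2
      · -- m even: m is the least even value, so me = m ≤ mo and mo ≠ m
        have hmInE : m ∈ (x :: t).filter (fun n => PySem.Int.mod n 2 == 0) :=
          List.mem_filter.mpr ⟨hmmem, by rw [beq_iff_eq, pvModEq]; exact hme2⟩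
        obtain ⟨_, hmeMin⟩ := pvMinFromFold _ _ hevens
        have h1 : me ≤ m := hmeMin m hmInE
        have hememe : me = m := le_antisymm h1 hmle_e
        have : ¬ (mo < me) := by omega
        rw [pvModEq, hme2]
        simp [this]
      · -- m odd: m is the least odd value, so mo = m < me
        have hmInO : m ∈ (x :: t).filter pvOddb :=
          List.mem_filter.mpr ⟨hmmem, by
            simp only [pvOddb, pvModEq, bne_iff_ne, ne_eq]; omega⟩
        obtain ⟨_, hmoMin⟩ := pvMinFromFold _ _ hodds
        have h1 : mo ≤ m := hmoMin m hmInO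
        have hmomo : mo = m := le_antisymm h1 hmle_o
        have : mo < me := by omega
        rw [pvModEq, hmo2]
        simp [this]

-- ===== VERDICT (by name: the statement is the Claim_ definition above) =====
theorem uniformArray_spec : Claim_equal_uniformArray := by
  intro nums1 _
  unfold Spec_uniformArray
  exact pvMain nums1
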